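-- pv_equiv track=rewrite | github.com/ADebut/Leetcode | 38. Count and Say.py | getRepeatNum
-- ===== SOURCE A (Python) =====
-- def getRepeatNum(s):
--     count = 1
--     letter = s[0]
--     for i in s[1:]:
--         if i == letter:
--             count += 1
--         else:
--             break
--     return count
-- ===== SOURCE B (Python) =====
-- def getRepeatNum(s):
--     letter = s[0]
--     return len(s) - len(s.lstrip(letter))
-- ===== Notes on version B (the rewrite author's own statement) =====
-- stated objective: idiomatic
-- what changed: Replaces the explicit count-and-break loop with stripping the leading run of the first character via str.lstrip and measuring the length difference.
import Mathlib
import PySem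

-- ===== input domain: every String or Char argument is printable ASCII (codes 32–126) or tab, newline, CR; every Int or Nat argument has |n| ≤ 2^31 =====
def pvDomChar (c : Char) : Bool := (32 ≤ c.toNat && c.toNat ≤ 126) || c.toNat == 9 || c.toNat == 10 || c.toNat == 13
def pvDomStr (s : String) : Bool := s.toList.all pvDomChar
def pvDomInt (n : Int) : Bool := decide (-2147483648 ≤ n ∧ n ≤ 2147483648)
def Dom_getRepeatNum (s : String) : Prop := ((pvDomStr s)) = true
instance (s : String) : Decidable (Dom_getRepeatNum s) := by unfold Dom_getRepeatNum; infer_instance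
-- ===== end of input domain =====

-- B replaces A's count-and-break loop by stripping the leading run of the first
-- character and measuring the length difference (idiomatic; same cost).

-- ===== PORT A =====
-- 'for i in s[1:]: if i == letter: count += 1 else: break'
def getRepeatNumLoop : List Char → Char → Int → Int
  | [], _, count => count
  | c :: rest, letter, count =>
      if c = letter then getRepeatNumLoop rest letter (count + 1) else count

def getRepeatNum (s : String) : Int :=
  let cs := s.toList
  let letter := PySem.List.pyGetD cs 0 ' '   -- s[0]; in range under Pre_ (s ≠ "")
  getRepeatNumLoop (PySem.List.slice cs (some 1) none) letter 1

-- ===== PORT B =====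
-- exact port of Python's s.lstrip(letter) for a single char: drop leading occurrences
def pyLstripChar (cs : List Char) (letter : Char) : List Char :=
  cs.dropWhile (· == letter)

def getRepeatNum_alt (s : String) : Int :=
  let letter := PySem.List.pyGetD s.toList 0 ' '   -- s[0]; in range under Pre_
  (s.toList.length : Int) - ((pyLstripChar s.toList letter).length : Int)

-- ===== PRECONDITION & SPEC =====
-- A raises IndexError on the empty string (s[0]); B raises there too.
def Pre_getRepeatNum (s : String) : Prop := s ≠ ""
instance (s : String) : Decidable (Pre_getRepeatNum s) := by unfold Pre_getRepeatNum; infer_instance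
def pvWitness_getRepeatNum : String := "aab"

def Spec_getRepeatNum (s : String) (out : Int) : Prop := out = getRepeatNum_alt s
instance (s : String) (out : Int) : Decidable (Spec_getRepeatNum s out) := by unfold Spec_getRepeatNum; infer_instance

-- ===== CLAIM (what is proved, stated in full; the proofs are below) =====
def Claim_equal_getRepeatNum : Prop := ∀ (s : String), Dom_getRepeatNum s → Pre_getRepeatNum s → Spec_getRepeatNum s (getRepeatNum s)

-- ===== LEMMAS AND PROOFS =====
theorem getRepeatNumLoop_eq (letter : Char) :
    ∀ (rest : List Char) (count : Int),
      getRepeatNumLoop rest letter count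
        = count + (rest.length : Int) - ((rest.dropWhile (· == letter)).length : Int) := by
  intro rest
  induction rest with
  | nil => intro count; simp [getRepeatNumLoop]
  | cons c rest ih =>
      intro count
      by_cases h : c = letter
      · simp [getRepeatNumLoop, h, List.dropWhile, ih]
        ring
      · rw [List.dropWhile_cons_of_neg (by simp [h])]
        simp [getRepeatNumLoop, h]

-- ===== VERDICT (by name: the statement is the Claim_ definition above) =====
theorem getRepeatNum_spec : Claim_equal_getRepeatNum := by
  intro s _ hpre
  unfold Spec_getRepeatNum getRepeatNum getRepeatNum_alt pyLstripChar
  have hne : s.toList ≠ [] := by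
    simpa using hpre
  obtain ⟨c, cs, hcs⟩ := List.exists_cons_of_ne_nil hne
  rw [hcs]
  simp [PySem.List.slice_from_one, PySem.List.pyGetD_zero_cons,
    getRepeatNumLoop_eq, List.dropWhile]
  ring
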